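-- pv_equiv track=rewrite | github.com/amuweee/advent_of_code | 2023/day_05_seed_location.py | get_set_of_mappings_from_data
-- ===== SOURCE A (Python) =====
-- from typing import List, NamedTuple
--
-- def get_set_of_mappings_from_data(data: List[str]) -> List[List[List[int]]]:
--     # get all the mappings ints
--     lines = [line for line in data[3:] if line[0].isdigit() or line[0] == "\n"]
--
--     # append into a list that contains all the mappins
--     maps = []
--     coords = []
--     for line in lines:
--         if line != "\n":
--             coords.append([int(i) for i in line.split()])
--         else:
--             maps.append(coords)
--             coords = []
--     maps.append(coords)
--
--     return maps
-- ===== SOURCE B (Python) =====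
-- def _split_blocks(lines):
--     # recursively split the line list at "\n" separators, keeping empty blocks
--     if not lines:
--         return [[]]
--     head, rest = lines[0], lines[1:]
--     blocks = _split_blocks(rest)
--     if head == "\n":
--         return [[]] + blocks
--     return [[head] + blocks[0]] + blocks[1:]
--
--
-- def get_set_of_mappings_from_data(data):
--     lines = [line for line in data[3:] if line[0].isdigit() or line[0] == "\n"]
--     return [[[int(t) for t in line.split()] for line in block]
--             for block in _split_blocks(lines)]
-- ===== Notes on version B (the rewrite author's own statement) =====
-- stated objective: alternative
-- what changed: Replaces the forward accumulator loop (maps/coords state with a trailing append) by a recursive splitter that builds the block list back-to-front and a nested comprehension that parses each block afterwards.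
import Mathlib
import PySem

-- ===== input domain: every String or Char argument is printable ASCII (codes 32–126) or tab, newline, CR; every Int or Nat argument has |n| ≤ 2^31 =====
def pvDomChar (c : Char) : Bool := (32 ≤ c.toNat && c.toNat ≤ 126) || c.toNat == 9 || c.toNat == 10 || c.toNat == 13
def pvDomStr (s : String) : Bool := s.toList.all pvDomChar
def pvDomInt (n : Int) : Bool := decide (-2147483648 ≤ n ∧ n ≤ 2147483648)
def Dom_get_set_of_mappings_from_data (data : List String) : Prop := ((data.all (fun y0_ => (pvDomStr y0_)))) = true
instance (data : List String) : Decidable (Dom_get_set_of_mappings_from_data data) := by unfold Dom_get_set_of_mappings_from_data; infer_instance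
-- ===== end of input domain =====

-- B replaces A's forward accumulator loop by a recursive splitter that builds the block
-- list back-to-front, then parses each block; equivalence of the return value is proved.

-- ===== PORT A =====
-- shared by both Pythons: the filter predicate `line[0].isdigit() or line[0] == "\n"`
def pvKeep (line : String) : Bool :=
  match PySem.Str.pyGet? line 0 with
  | some c => PySem.Chars.isdigit c || c == '\n'
  | none => false   -- line[0] raises IndexError on "" — excluded by Pre_

-- `[int(i) for i in line.split()]`; `.getD 0` is never reached under Pre_ (int() would raise)
def pvParseLine (line : String) : List Int :=
  (PySem.Str.split₀ line).map (fun t => (PySem.Int.ofStr? t).getD 0)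

-- A's for-loop over `lines` with state (maps, coords), then `maps.append(coords)`
def pvLoopA : List String → List (List (List Int)) → List (List Int) → List (List (List Int))
  | [], maps, coords => maps ++ [coords]
  | line :: rest, maps, coords =>
    if line ≠ "\n" then pvLoopA rest maps (coords ++ [pvParseLine line])
    else pvLoopA rest (maps ++ [coords]) []

def get_set_of_mappings_from_data (data : List String) : List (List (List Int)) :=
  pvLoopA ((PySem.List.slice data (some 3) none).filter pvKeep) [] []

-- ===== PORT B =====
-- Source B's `_split_blocks`: recursive split at "\n" separators, keeping empty blocks
def pvSplitBlocks : List String → List (List String)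
  | [] => [[]]
  | head :: rest =>
    let blocks := pvSplitBlocks rest
    if head = "\n" then [] :: blocks
    else (head :: blocks.headD []) :: blocks.drop 1   -- [[head]+blocks[0]] + blocks[1:]

def get_set_of_mappings_from_data_alt (data : List String) : List (List (List Int)) :=
  (pvSplitBlocks ((PySem.List.slice data (some 3) none).filter pvKeep)).map
    (fun block => block.map pvParseLine)

-- ===== PRECONDITION & SPEC =====
-- Pre_ excludes exactly the inputs where A raises: an empty line in data[3:] (IndexError
-- from line[0]) or a kept non-"\n" line with a token int() rejects (ValueError).
def Pre_get_set_of_mappings_from_data (data : List String) : Prop :=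
  ∀ line ∈ PySem.List.slice data (some 3) none,
    line ≠ "" ∧ (pvKeep line = true → line ≠ "\n" →
      ∀ t ∈ PySem.Str.split₀ line, (PySem.Int.ofStr? t).isSome = true)
instance (data : List String) : Decidable (Pre_get_set_of_mappings_from_data data) := by
  unfold Pre_get_set_of_mappings_from_data; infer_instance

def pvWitness_get_set_of_mappings_from_data : List String :=
  ["seeds: 1 2\n", "\n", "a-to-b map:\n", "10 20 30\n", "\n", "5 6 7\n"]

def Spec_get_set_of_mappings_from_data (data : List String) (out : List (List (List Int))) : Prop :=
  out = get_set_of_mappings_from_data_alt data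
instance (data : List String) (out : List (List (List Int))) : Decidable (Spec_get_set_of_mappings_from_data data out) := by
  unfold Spec_get_set_of_mappings_from_data; infer_instance

-- ===== CLAIM (what is proved, stated in full; the proofs are below) =====
def Claim_equal_get_set_of_mappings_from_data : Prop :=
  ∀ (data : List String), Dom_get_set_of_mappings_from_data data →
    Pre_get_set_of_mappings_from_data data →
    Spec_get_set_of_mappings_from_data data (get_set_of_mappings_from_data data)

-- ===== LEMMAS AND PROOFS =====

theorem pvSplitBlocks_ne_nil (lines : List String) : pvSplitBlocks lines ≠ [] := by
  cases lines with
  | nil => simp [pvSplitBlocks]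
  | cons h t =>
    simp only [pvSplitBlocks]
    split_ifs <;> simp

-- loop invariant: A's fold equals maps ++ (B's block list, parsed, with coords prepended
-- into the first block)
theorem pvLoopA_eq_split (lines : List String) :
    ∀ (maps : List (List (List Int))) (coords : List (List Int)),
    pvLoopA lines maps coords =
      maps ++ (((pvSplitBlocks lines).map (fun b => b.map pvParseLine)).modifyHead
        (fun b => coords ++ b)) := by
  induction lines with
  | nil => intro maps coords; simp [pvLoopA, pvSplitBlocks]
  | cons line rest ih =>
    intro maps coords
    obtain ⟨b, bs, hb⟩ : ∃ b bs, pvSplitBlocks rest = b :: bs := by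
      cases h : pvSplitBlocks rest with
      | nil => exact absurd h (pvSplitBlocks_ne_nil rest)
      | cons x xs => exact ⟨x, xs, rfl⟩
    by_cases h : line = "\n"
    · simp [pvLoopA, pvSplitBlocks, h, ih, hb]
    · simp [pvLoopA, pvSplitBlocks, h, ih, hb]

theorem get_set_of_mappings_from_data_spec : Claim_equal_get_set_of_mappings_from_data := by
  intro data _ _
  unfold Spec_get_set_of_mappings_from_data
  unfold get_set_of_mappings_from_data get_set_of_mappings_from_data_alt
  rw [pvLoopA_eq_split]
  obtain ⟨b, bs, hb⟩ : ∃ b bs,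
      pvSplitBlocks ((PySem.List.slice data (some 3) none).filter pvKeep) = b :: bs := by
    cases h : pvSplitBlocks ((PySem.List.slice data (some 3) none).filter pvKeep) with
    | nil => exact absurd h (pvSplitBlocks_ne_nil _)
    | cons x xs => exact ⟨x, xs, rfl⟩
  simp [hb]
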